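-- pv_equiv track=rewrite | github.com/brabemi/codewars-python | 2-egg_crush.py | height_rec
-- ===== SOURCE A (Python) =====
-- def height_rec(n,m):
--     if m == 0 or n == 0:
--         return 0
--     if m == 1:
--         return 1
--     if n>m:
--         n = m
--     return height_rec(n-1, m-1) + 1 + height_rec(n, m-1)
-- ===== SOURCE B (Python) =====
-- def height_rec(n, m):
--     # closed form: max floors = sum_{i=1}^{min(n,m)} C(m, i), binomials built incrementally
--     k = min(n, m)
--     total = 0
--     c = 1
--     for i in range(1, k + 1):
--         c = c * (m - i + 1) // i
--         total += c
--     return total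
-- ===== Notes on version B (the rewrite author's own statement) =====
-- stated objective: faster
-- what changed: Replaces the exponential two-branch recursion by the closed-form sum of binomial coefficients C(m,i) for i=1..min(n,m), computed in one incremental loop.
-- outside the precondition, e.g. on height_rec(-1, 3): A returns 7, B returns 0; on height_rec(2, -3): A raises RecursionError, B returns 0
import Mathlib
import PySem

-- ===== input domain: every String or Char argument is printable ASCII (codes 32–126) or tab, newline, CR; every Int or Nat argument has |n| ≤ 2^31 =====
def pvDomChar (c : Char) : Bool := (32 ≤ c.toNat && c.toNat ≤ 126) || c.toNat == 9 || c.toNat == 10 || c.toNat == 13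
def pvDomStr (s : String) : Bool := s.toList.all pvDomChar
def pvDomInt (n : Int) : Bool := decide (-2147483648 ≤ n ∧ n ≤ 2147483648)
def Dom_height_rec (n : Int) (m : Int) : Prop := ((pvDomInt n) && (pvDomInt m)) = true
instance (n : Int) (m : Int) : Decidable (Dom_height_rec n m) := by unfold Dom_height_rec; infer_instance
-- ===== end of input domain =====

-- B replaces A's exponential recursion by the closed-form sum of binomials C(m,i), i = 1..min(n,m); intended as faster (probe runs: A timed out where B returned; one run measured B 455x at n=16, another got no clean reading).

-- ===== PORT A =====
def height_rec (n : Int) (m : Int) : Int :=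
  if m = 0 ∨ n = 0 then 0
  else if m = 1 then 1
  else if m < 0 then 0  -- Python diverges (RecursionError) for m < 0 with n ≠ 0; totalization stub, outside Pre_
  else
    let n' := if n > m then m else n
    height_rec (n' - 1) (m - 1) + 1 + height_rec n' (m - 1)
termination_by m.toNat
decreasing_by all_goals omega

-- ===== PORT B =====
def height_rec_alt (n : Int) (m : Int) : Int :=
  let k := min n m
  ((PySem.List.pyRange 1 (k + 1) 1).foldl
      (fun (st : Int × Int) i =>
        let c := PySem.Int.floordiv (st.2 * (m - i + 1)) i
        (st.1 + c, c)) (0, 1)).1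

-- ===== PRECONDITION & SPEC =====
-- Pre_ restricts to the task's natural domain (eggs, drops ≥ 0): for m < 0 with n ≠ 0 A recurses
-- forever (RecursionError), and for n < 0 A's value 2^m−1 is an artefact of the missing n < 0 base case.
def Pre_height_rec (n : Int) (m : Int) : Prop := 0 ≤ n ∧ 0 ≤ m
instance (n : Int) (m : Int) : Decidable (Pre_height_rec n m) := by unfold Pre_height_rec; infer_instance
def pvWitness_height_rec : Int × Int := (3, 5)
def Spec_height_rec (n : Int) (m : Int) (out : Int) : Prop := out = height_rec_alt n m
instance (n : Int) (m : Int) (out : Int) : Decidable (Spec_height_rec n m out) := by unfold Spec_height_rec; infer_instance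

-- ===== CLAIM (what is proved, stated in full; the proofs are below) =====
def Claim_equal_height_rec : Prop := ∀ (n : Int) (m : Int), Dom_height_rec n m → Pre_height_rec n m → Spec_height_rec n m (height_rec n m)

-- ===== LEMMAS AND PROOFS =====

-- A's recursion restated on Nat (structural on m)
def heightN : Nat → Nat → Nat
  | _, 0 => 0
  | n, 1 => if n = 0 then 0 else 1
  | n, (m+2) => if n = 0 then 0 else
      heightN (min n (m+2) - 1) (m+1) + 1 + heightN (min n (m+2)) (m+1)

-- the closed form: S m k = Σ_{i=1}^{k} C(m,i)
def S (m k : Nat) : Nat := ∑ j ∈ Finset.range k, m.choose (j+1)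

lemma S_succ (m k : Nat) : S m (k+1) = S m k + m.choose (k+1) := by
  simp [S, Finset.sum_range_succ]

lemma S_pascal (m k : Nat) : S (m+1) (k+1) = S m k + 1 + S m (k+1) := by
  have h : ∀ j, (m+1).choose (j+1) = m.choose j + m.choose (j+1) := fun j => Nat.choose_succ_succ m j
  calc S (m+1) (k+1) = ∑ j ∈ Finset.range (k+1), (m.choose j + m.choose (j+1)) := by
        simp only [S]; exact Finset.sum_congr rfl (fun j _ => h j)
    _ = (∑ j ∈ Finset.range (k+1), m.choose j) + S m (k+1) := by
        simp [S, Finset.sum_add_distrib]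
    _ = (m.choose 0 + ∑ j ∈ Finset.range k, m.choose (j+1)) + S m (k+1) := by
        rw [Finset.sum_range_succ']
        omega
    _ = S m k + 1 + S m (k+1) := by simp [S]; omega

lemma S_clamp (m k : Nat) (h : m ≤ k) : S m k = S m m := by
  induction k with
  | zero => have : m = 0 := by omega
            simp [this]
  | succ k ih =>
    rcases Nat.lt_or_ge m (k+1) with hlt | hge
    · rw [S_succ, Nat.choose_eq_zero_of_lt (by omega), ih (by omega)]; ring
    · have : m = k + 1 := by omega
      rw [this]

lemma heightN_eq_S : ∀ m n : Nat, heightN n m = S m (min n m) := by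
  intro m
  induction m using Nat.strong_induction_on with
  | _ m ih =>
    intro n
    match m with
    | 0 => simp [heightN, S]
    | 1 =>
      rcases Nat.eq_zero_or_pos n with h | h
      · simp [heightN, h, S]
      · have hn0 : n ≠ 0 := by omega
        have : min n 1 = 1 := by omega
        simp [heightN, S, hn0, this]
    | (m+2) =>
      rcases Nat.eq_zero_or_pos n with h | h
      · simp [heightN, h, S]
      · have hk1 : 1 ≤ min n (m+2) := by omega
        have hk2 : min n (m+2) ≤ m+2 := by omega
        rw [heightN, if_neg (by omega)]
        rw [ih (m+1) (by omega), ih (m+1) (by omega)]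
        have e1 : min (min n (m+2) - 1) (m+1) = min n (m+2) - 1 := by omega
        have e2 : S (m+1) (min (min n (m+2)) (m+1)) = S (m+1) (min n (m+2)) := by
          rcases Nat.lt_or_ge (min n (m+2)) (m+2) with hlt | hge
          · have : min (min n (m+2)) (m+1) = min n (m+2) := by omega
            rw [this]
          · have h1 : min (min n (m+2)) (m+1) = m+1 := by omega
            have h2 : min n (m+2) = m+2 := by omega
            rw [h1, h2, S_clamp (m+1) (m+2) (by omega)]
        rw [e1, e2]
        have := S_pascal (m+1) (min n (m+2) - 1)
        rw [Nat.sub_add_cancel hk1] at this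
        rw [this]

-- bridge: port A computes heightN on the natural domain
lemma height_rec_eq_heightN : ∀ (mN : Nat) (n m : Int), 0 ≤ n → m = (mN : Int) →
    height_rec n m = (heightN n.toNat mN : Int) := by
  intro mN
  induction mN using Nat.strong_induction_on with
  | _ mN ih =>
    intro n m hn hm
    match mN with
    | 0 =>
      rw [height_rec]
      simp [hm, heightN]
    | 1 =>
      rw [height_rec, hm]
      rcases eq_or_ne n 0 with h | h
      · simp [h, heightN]
      · have hn0 : n.toNat ≠ 0 := by omega
        simp [h, heightN, hn0]
    | (mN+2) =>
      rw [height_rec, hm]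
      rcases eq_or_ne n 0 with h | h
      · simp [h, heightN]
      · have hn1 : 1 ≤ n := by omega
        push_cast
        rw [if_neg (by omega), if_neg (by omega), if_neg (by omega)]
        have hmin : (if n > ((mN:Int)+2) then ((mN:Int)+2) else n) = min n ((mN:Int)+2) := by
          rcases lt_or_ge ((mN:Int)+2) n with h1 | h1
          · rw [if_pos h1, min_eq_right (by omega)]
          · rw [if_neg (by omega), min_eq_left (by omega)]
        rw [hmin]
        have hk1 : 1 ≤ min n ((mN:Int)+2) := by omega
        have e1 := ih (mN+1) (by omega) (min n ((mN:Int)+2) - 1) ((mN:Int)+2-1) (by omega) (by push_cast; ring)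
        have e2 := ih (mN+1) (by omega) (min n ((mN:Int)+2)) ((mN:Int)+2-1) (by omega) (by push_cast; ring)
        rw [e1, e2]
        have t1 : (min n ((mN:Int)+2) - 1).toNat = min n.toNat (mN+2) - 1 := by omega
        have t2 : (min n ((mN:Int)+2)).toNat = min n.toNat (mN+2) := by omega
        rw [t1, t2]
        have hnz : n.toNat ≠ 0 := by omega
        rw [heightN, if_neg hnz]
        push_cast
        ring

-- B's fold invariant: after processing 1..k, total = S m k and c = C(m,k)
lemma fold_inv : ∀ (kN : Nat) (m : Int), 0 ≤ m → (kN : Int) ≤ m →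
    (PySem.List.pyRange 1 ((kN : Int) + 1) 1).foldl
      (fun (st : Int × Int) i =>
        let c := PySem.Int.floordiv (st.2 * (m - i + 1)) i
        (st.1 + c, c)) (0, 1)
    = ((S m.toNat kN : Int), (m.toNat.choose kN : Int)) := by
  intro kN
  induction kN with
  | zero =>
    intro m hm hk
    simp only [Nat.cast_zero, zero_add]
    rw [PySem.List.pyRange_one_eq_nil le_rfl]
    simp [S]
  | succ k ihk =>
    intro m hm hk
    have hcast : ((k+1:Nat):Int) = (k:Int)+1 := by push_cast; ring
    rw [hcast]
    have hsplit : PySem.List.pyRange 1 ((k:Int) + 1 + 1) 1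
        = PySem.List.pyRange 1 ((k:Int) + 1) 1 ++ [(k:Int) + 1] := by
      have := PySem.List.pyRange_one_succ_right (a := 1) (b := (k:Int)+1) (by omega)
      simpa using this
    have hk' : (k : Int) ≤ m := by rw [hcast] at hk; omega
    rw [hsplit, List.foldl_append, ihk m hm hk']
    simp only [List.foldl_cons, List.foldl_nil]
    have harg : m - ((k:Int) + 1) + 1 = ((m.toNat - k : Nat) : Int) := by omega
    have hNat : m.toNat.choose k * (m.toNat - k) = m.toNat.choose (k+1) * (k+1) :=
      (Nat.choose_succ_right_eq m.toNat k).symm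
    have hmul : (m.toNat.choose k : Int) * ((m.toNat - k : Nat) : Int)
        = ((m.toNat.choose (k+1) * (k+1) : Nat) : Int) := by exact_mod_cast hNat
    rw [harg, hmul]
    have hdiv : PySem.Int.floordiv ((m.toNat.choose (k+1) * (k+1) : Nat) : Int) ((k:Int) + 1)
        = (m.toNat.choose (k+1) : Int) := by
      have h2 : ((k:Int) + 1) = ((k+1 : Nat) : Int) := by push_cast; ring
      rw [h2, PySem.Int.floordiv_natCast]
      norm_cast
      exact Nat.mul_div_cancel _ (by omega)
    rw [hdiv, S_succ]
    push_cast
    ring_nf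

lemma alt_eq (n m : Int) (hn : 0 ≤ n) (hm : 0 ≤ m) :
    height_rec_alt n m = (S m.toNat (min n m).toNat : Int) := by
  obtain ⟨kN, hkN⟩ : ∃ kN : Nat, min n m = (kN : Int) := ⟨(min n m).toNat, by omega⟩
  simp only [height_rec_alt]
  rw [hkN, fold_inv kN m hm (by omega)]
  simp [Int.toNat_natCast]

-- ===== VERDICT (by name: the statement is the Claim_ definition above) =====
theorem height_rec_spec : Claim_equal_height_rec := by
  intro n m _ hpre
  obtain ⟨hn, hm⟩ := hpre
  unfold Spec_height_rec
  rw [height_rec_eq_heightN m.toNat n m hn (by omega), heightN_eq_S,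
      alt_eq n m hn hm]
  have : min n.toNat m.toNat = (min n m).toNat := by omega
  rw [this]
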